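-- pv_equiv track=rewrite | github.com/Streak306/PerfectLayout | core.py | count_empty_clean_chunks
-- ===== SOURCE A (Python) =====
-- from typing import Dict, List, Tuple, Optional, Callable, Iterable
--
-- def count_empty_clean_chunks(
--     map_w: int,
--     map_h: int,
--     blocked: set[Tuple[int,int]],
--     occ: set[Tuple[int,int]],
--     chunk_size: int = 4,
-- ) -> int:
--     """Chunks 4x4 totalmente vazios e sem bloqueios."""
--     count = 0
--     for cy in range(0, map_h, chunk_size):
--         if cy + chunk_size > map_h:
--             break
--         for cx in range(0, map_w, chunk_size):
--             if cx + chunk_size > map_w: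
--                 break
--             has_block = False
--             has_occ = False
--             for yy in range(cy, cy + chunk_size):
--                 for xx in range(cx, cx + chunk_size):
--                     if (xx, yy) in blocked:
--                         has_block = True
--                         break
--                     if (xx, yy) in occ:
--                         has_occ = True
--                 if has_block:
--                     break
--             if not has_block and not has_occ:
--                 count += 1
--     return count
-- ===== SOURCE B (Python) =====
-- def count_empty_clean_chunks(
--     map_w: int,
--     map_h: int,
--     blocked: set,
--     occ: set,
--     chunk_size: int = 4,
-- ) -> int:
--     """Chunks 4x4 totalmente vazios e sem bloqueios."""
--     ncx = max(map_w // chunk_size, 0)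
--     ncy = max(map_h // chunk_size, 0)
--     tainted = set()
--     for pts in (blocked, occ):
--         for x, y in pts:
--             i, j = x // chunk_size, y // chunk_size
--             if 0 <= i < ncx and 0 <= j < ncy:
--                 tainted.add((i, j))
--     return ncx * ncy - len(tainted)
-- ===== Notes on version B (the rewrite author's own statement) =====
-- stated objective: alternative
-- what changed: Instead of scanning every cell of every chunk of the grid, B maps each blocked/occupied point to the chunk containing it and returns (total full chunks) minus (number of distinct tainted full chunks); cost moves from grid area to number of points.
-- outside the precondition, e.g. on count_empty_clean_chunks(-2, -2, {(0, 0)}, set(), -2): A returns 1, B returns 0; on count_empty_clean_chunks(4, 4, set(), set(), 0): A raises ValueError, B raises ZeroDivisionError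
import Mathlib
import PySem

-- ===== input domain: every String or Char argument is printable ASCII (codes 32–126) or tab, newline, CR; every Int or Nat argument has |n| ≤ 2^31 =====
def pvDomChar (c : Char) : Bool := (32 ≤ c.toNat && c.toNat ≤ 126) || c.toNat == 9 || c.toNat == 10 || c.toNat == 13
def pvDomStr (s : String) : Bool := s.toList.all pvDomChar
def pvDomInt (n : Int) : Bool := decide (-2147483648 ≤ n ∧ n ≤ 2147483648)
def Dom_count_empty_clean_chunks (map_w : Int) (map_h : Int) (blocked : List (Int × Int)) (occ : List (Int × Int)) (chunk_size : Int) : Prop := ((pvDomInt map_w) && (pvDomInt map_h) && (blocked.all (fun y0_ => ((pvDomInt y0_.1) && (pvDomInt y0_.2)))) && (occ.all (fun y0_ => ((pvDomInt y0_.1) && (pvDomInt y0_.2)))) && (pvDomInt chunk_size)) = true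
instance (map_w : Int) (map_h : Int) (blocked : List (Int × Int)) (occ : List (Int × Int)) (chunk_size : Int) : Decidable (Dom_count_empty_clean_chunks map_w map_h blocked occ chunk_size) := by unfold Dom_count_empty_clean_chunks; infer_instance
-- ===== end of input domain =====

-- B replaces A's full-grid cell scan by mapping each blocked/occupied point to its chunk and subtracting the
-- number of distinct tainted full chunks from the total (objective: alternative — work per point, not per cell).


-- ===== PORT A =====
-- the innermost 'for xx' loop of A: flags (has_block, has_occ); 'break' on a blocked cell
def pvA_innerX (blocked occ : List (Int × Int)) (yy : Int) (xs : List Int) (hb ho : Bool) : Bool × Bool :=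
  match xs with
  | [] => (hb, ho)
  | xx :: rest =>
    if blocked.contains (xx, yy) then (true, ho)
    else if occ.contains (xx, yy) then pvA_innerX blocked occ yy rest hb true
    else pvA_innerX blocked occ yy rest hb ho
def pvA_innerY (blocked occ : List (Int × Int)) (cx chunk_size : Int) (ys : List Int) (hb ho : Bool) : Bool × Bool :=
  match ys with
  | [] => (hb, ho)
  | yy :: rest =>
    let r := pvA_innerX blocked occ yy (PySem.List.pyRange cx (cx + chunk_size) 1) hb ho
    if r.1 then r else pvA_innerY blocked occ cx chunk_size rest r.1 r.2

-- the 'for cx' loop with its break 'cx + chunk_size > map_w', and the 'for cy' loop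
def pvA_loopX (map_w : Int) (blocked occ : List (Int × Int)) (cy chunk_size : Int) (cxs : List Int) (count : Int) : Int :=
  match cxs with
  | [] => count
  | cx :: rest =>
    if cx + chunk_size > map_w then count
    else
      let r := pvA_innerY blocked occ cx chunk_size (PySem.List.pyRange cy (cy + chunk_size) 1) false false
      pvA_loopX map_w blocked occ cy chunk_size rest (if !r.1 && !r.2 then count + 1 else count)

def pvA_loopY (map_w map_h : Int) (blocked occ : List (Int × Int)) (chunk_size : Int) (cys : List Int) (count : Int) : Int :=
  match cys with
  | [] => count
  | cy :: rest =>
    if cy + chunk_size > map_h then count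
    else
      pvA_loopY map_w map_h blocked occ chunk_size rest
        (pvA_loopX map_w blocked occ cy chunk_size (PySem.List.pyRange 0 map_w chunk_size) count)

def count_empty_clean_chunks (map_w : Int) (map_h : Int) (blocked : List (Int × Int)) (occ : List (Int × Int)) (chunk_size : Int) : Int :=
  pvA_loopY map_w map_h blocked occ chunk_size (PySem.List.pyRange 0 map_h chunk_size) 0

-- ===== PORT B =====
def count_empty_clean_chunks_alt (map_w : Int) (map_h : Int) (blocked : List (Int × Int)) (occ : List (Int × Int)) (chunk_size : Int) : Int :=
  let ncx : Int := max (PySem.Int.floordiv map_w chunk_size) 0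
  let ncy : Int := max (PySem.Int.floordiv map_h chunk_size) 0
  let step : PySem.Set (Int × Int) → (Int × Int) → PySem.Set (Int × Int) := fun s p =>
    let i := PySem.Int.floordiv p.1 chunk_size
    let j := PySem.Int.floordiv p.2 chunk_size
    if 0 ≤ i ∧ i < ncx ∧ 0 ≤ j ∧ j < ncy then PySem.Set.add s (i, j) else s
  let tainted : PySem.Set (Int × Int) := occ.foldl step (blocked.foldl step PySem.Set.empty)
  ncx * ncy - PySem.Set.len tainted

-- ===== PRECONDITION & SPEC =====
-- Pre_ excludes chunk_size ≤ 0: with chunk_size = 0 the Python A raises ValueError (range step 0; B raises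
-- ZeroDivisionError), and a negative chunk_size is outside the function's natural domain (A then walks empty
-- or backwards ranges and can count phantom chunks whose cells are never inspected).
def Pre_count_empty_clean_chunks (map_w : Int) (map_h : Int) (blocked : List (Int × Int)) (occ : List (Int × Int)) (chunk_size : Int) : Prop := 1 ≤ chunk_size
instance (map_w : Int) (map_h : Int) (blocked : List (Int × Int)) (occ : List (Int × Int)) (chunk_size : Int) : Decidable (Pre_count_empty_clean_chunks map_w map_h blocked occ chunk_size) := by unfold Pre_count_empty_clean_chunks; infer_instance

def pvWitness_count_empty_clean_chunks : Int × Int × (List (Int × Int)) × (List (Int × Int)) × Int := (8, 8, [(0, 0)], [(5, 5)], 4)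

def Spec_count_empty_clean_chunks (map_w : Int) (map_h : Int) (blocked : List (Int × Int)) (occ : List (Int × Int)) (chunk_size : Int) (out : Int) : Prop := out = count_empty_clean_chunks_alt map_w map_h blocked occ chunk_size
instance (map_w : Int) (map_h : Int) (blocked : List (Int × Int)) (occ : List (Int × Int)) (chunk_size : Int) (out : Int) : Decidable (Spec_count_empty_clean_chunks map_w map_h blocked occ chunk_size out) := by unfold Spec_count_empty_clean_chunks; infer_instance

-- ===== CLAIM (what is proved, stated in full; the proofs are below) =====
def Claim_equal_count_empty_clean_chunks : Prop := ∀ (map_w : Int) (map_h : Int) (blocked : List (Int × Int)) (occ : List (Int × Int)) (chunk_size : Int), Dom_count_empty_clean_chunks map_w map_h blocked occ chunk_size → Pre_count_empty_clean_chunks map_w map_h blocked occ chunk_size → Spec_count_empty_clean_chunks map_w map_h blocked occ chunk_size (count_empty_clean_chunks map_w map_h blocked occ chunk_size)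

-- ===== LEMMAS AND PROOFS =====
def pvBad (blocked occ : List (Int × Int)) (xx yy : Int) : Bool :=
  blocked.contains (xx, yy) || occ.contains (xx, yy)
def pvDirty (blocked occ : List (Int × Int)) (cs i j : Int) : Bool :=
  (blocked ++ occ).any (fun p => PySem.Int.floordiv p.1 cs == i && PySem.Int.floordiv p.2 cs == j)

theorem pvA_innerX_or (blocked occ : List (Int × Int)) (yy : Int) (xs : List Int) (hb ho : Bool) :
    ((pvA_innerX blocked occ yy xs hb ho).1 || (pvA_innerX blocked occ yy xs hb ho).2)
      = (hb || ho || xs.any (fun xx => pvBad blocked occ xx yy)) := by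
  induction xs generalizing hb ho with
  | nil => simp [pvA_innerX]
  | cons xx rest ih =>
    simp only [pvA_innerX, List.any_cons]
    cases hB : blocked.contains (xx, yy) <;> cases hO : occ.contains (xx, yy)
    · have h1 : ¬ (xx, yy) ∈ blocked := by simpa using hB
      have h2 : ¬ (xx, yy) ∈ occ := by simpa using hO
      simp [pvBad, ih, h1, h2]
    · have h2 : (xx, yy) ∈ occ := by simpa using hO
      simp [pvBad, ih, h2]
    · have h1 : (xx, yy) ∈ blocked := by simpa using hB
      simp [pvBad, h1]
    · have h1 : (xx, yy) ∈ blocked := by simpa using hB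
      simp [pvBad, h1]
theorem pvA_innerY_or (blocked occ : List (Int × Int)) (cx cs : Int) (ys : List Int) (hb ho : Bool) :
    ((pvA_innerY blocked occ cx cs ys hb ho).1 || (pvA_innerY blocked occ cx cs ys hb ho).2)
      = (hb || ho || ys.any (fun yy => (PySem.List.pyRange cx (cx + cs) 1).any (fun xx => pvBad blocked occ xx yy))) := by
  induction ys generalizing hb ho with
  | nil => simp [pvA_innerY]
  | cons yy rest ih =>
    simp only [pvA_innerY, List.any_cons]
    have hx := pvA_innerX_or blocked occ yy (PySem.List.pyRange cx (cx + cs) 1) hb ho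
    cases hr1 : (pvA_innerX blocked occ yy (PySem.List.pyRange cx (cx + cs) 1) hb ho).1
    · simp only [hr1, if_neg Bool.false_ne_true, ih]
      rw [hr1] at hx; simp at hx
      simp [hx, Bool.or_assoc]
    · simp only [hr1, if_pos rfl]
      rw [hr1] at hx; simp at hx
      simp [hr1, ← Bool.or_assoc, hx]
theorem pvA_chunk (blocked occ : List (Int × Int)) (cs i j : Int) (hcs : 1 ≤ cs) :
    ((pvA_innerY blocked occ (cs * i) cs (PySem.List.pyRange (cs * j) (cs * j + cs) 1) false false).1
      || (pvA_innerY blocked occ (cs * i) cs (PySem.List.pyRange (cs * j) (cs * j + cs) 1) false false).2)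
      = pvDirty blocked occ cs i j := by
  rw [pvA_innerY_or, pvDirty, Bool.eq_iff_iff]
  simp only [Bool.false_or, List.any_eq_true, PySem.List.mem_pyRange_one, pvBad,
    Bool.or_eq_true, List.contains_iff_mem, List.mem_append, beq_iff_eq, Bool.and_eq_true,
    decide_eq_true_eq]
  constructor
  · rintro ⟨yy, ⟨hy1, hy2⟩, xx, ⟨hx1, hx2⟩, hmem⟩
    refine ⟨(xx, yy), by simpa using hmem, ?_, ?_⟩
    · rw [PySem.Int.floordiv_eq_iff_of_pos (by omega)]
      constructor <;> nlinarith
    · rw [PySem.Int.floordiv_eq_iff_of_pos (by omega)]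
      constructor <;> nlinarith
  · rintro ⟨⟨x, y⟩, hmem, hi, hj⟩
    rw [PySem.Int.floordiv_eq_iff_of_pos (by omega)] at hi hj
    exact ⟨y, ⟨by nlinarith, by nlinarith⟩, x, ⟨by nlinarith, by nlinarith⟩, by simpa using hmem⟩

-- the chunk at anchor (cx, cy) is counted by A
def pvCleanB (blocked occ : List (Int × Int)) (cs cx cy : Int) : Bool :=
  !(pvA_innerY blocked occ cx cs (PySem.List.pyRange cy (cy + cs) 1) false false).1
    && !(pvA_innerY blocked occ cx cs (PySem.List.pyRange cy (cy + cs) 1) false false).2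

theorem pvA_loopX_split (map_w : Int) (blocked occ : List (Int × Int)) (cy cs : Int) :
    ∀ (l₁ l₂ : List Int) (count : Int), (∀ cx ∈ l₁, cx + cs ≤ map_w) → (∀ c ∈ l₂.head?, map_w < c + cs) →
      pvA_loopX map_w blocked occ cy cs (l₁ ++ l₂) count
        = count + (l₁.countP (fun cx => pvCleanB blocked occ cs cx cy) : Int) := by
  intro l₁
  induction l₁ with
  | nil =>
    intro l₂ count _ hbrk
    cases l₂ with
    | nil => simp [pvA_loopX]
    | cons c t =>
      have hc : map_w < c + cs := hbrk c (by simp)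
      simp [pvA_loopX, hc]
  | cons cx rest ih =>
    intro l₂ count hle hbrk
    have hcx : cx + cs ≤ map_w := hle cx (by simp)
    simp only [List.cons_append, pvA_loopX, if_neg (by omega : ¬ cx + cs > map_w)]
    rw [ih l₂ _ (fun x hx => hle x (by simp [hx])) hbrk]
    rw [List.countP_cons]
    unfold pvCleanB
    split_ifs with h
    · push_cast; ring
    · push_cast; ring

theorem pvA_loopY_split (map_w map_h : Int) (blocked occ : List (Int × Int)) (cs : Int) :
    ∀ (l₁ l₂ : List Int) (count : Int), (∀ cy ∈ l₁, cy + cs ≤ map_h) → (∀ c ∈ l₂.head?, map_h < c + cs) →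
      pvA_loopY map_w map_h blocked occ cs (l₁ ++ l₂) count
        = l₁.foldl (fun c cy => pvA_loopX map_w blocked occ cy cs (PySem.List.pyRange 0 map_w cs) c) count := by
  intro l₁
  induction l₁ with
  | nil =>
    intro l₂ count _ hbrk
    cases l₂ with
    | nil => simp [pvA_loopY]
    | cons c t =>
      have hc : map_h < c + cs := hbrk c (by simp)
      simp [pvA_loopY, hc]
  | cons cy rest ih =>
    intro l₂ count hle hbrk
    have hcy : cy + cs ≤ map_h := hle cy (by simp)
    simp only [List.cons_append, pvA_loopY, if_neg (by omega : ¬ cy + cs > map_h), List.foldl_cons]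
    exact ih l₂ _ (fun x hx => hle x (by simp [hx])) hbrk

-- pyRange 0 w cs is the full-chunk anchors (cs*0 … cs*(n-1)), n = max(w//cs, 0), followed by a broken tail
theorem pvRange_decomp (w cs : Int) (hcs : 1 ≤ cs) :
    ∃ l₂ : List Int,
      PySem.List.pyRange 0 w cs
        = (List.range (max (PySem.Int.floordiv w cs) 0).toNat).map (fun k : Nat => cs * (k : Int)) ++ l₂
      ∧ (∀ c ∈ l₂.head?, w < c + cs)
      ∧ (∀ k : Nat, k < (max (PySem.Int.floordiv w cs) 0).toNat → cs * (k : Int) + cs ≤ w) := by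
  have hcs' : (0:Int) < cs := by omega
  set n : Nat := (max (PySem.Int.floordiv w cs) 0).toNat with hn
  have hfd : PySem.Int.floordiv w cs = w / cs := PySem.Int.floordiv_eq_ediv_of_pos hcs'
  have hrange := PySem.List.pyRange_of_pos 0 w hcs'
  by_cases hw : 0 < w
  · have hq0 : 0 ≤ w / cs := Int.ediv_nonneg (by omega) (by omega)
    have hnq : (n : Int) = w / cs := by
      rw [hn, hfd]; omega
    set m : Nat := ((w - 0 + cs - 1) / cs).toNat with hm
    have hrw : PySem.List.pyRange 0 w cs = (List.range m).map (fun k : Nat => cs * (k : Int)) := by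
      rw [hrange, if_pos hw]; simp only [zero_add]
    have hnm : n ≤ m := by
      have h1 : w / cs ≤ (w - 0 + cs - 1) / cs := by
        apply Int.ediv_le_ediv hcs'; omega
      omega
    have hmul : cs * (n : Int) ≤ w := by
      rw [hnq]
      calc cs * (w / cs) = w / cs * cs := by ring
        _ ≤ w := Int.ediv_mul_le w (by omega)
    have hsplit : List.range m = List.range n ++ (List.range (m - n)).map (fun k => n + k) := by
      rw [show m = n + (m - n) by omega, List.range_add]
      simp
    refine ⟨(List.range (m - n)).map (fun k : Nat => cs * ((n + k : Nat) : Int)), ?_, ?_, ?_⟩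
    · rw [hrw, hsplit, List.map_append, List.map_map]
      rfl
    · intro c hc
      cases hmn : m - n with
      | zero => simp [hmn] at hc
      | succ t =>
        rw [hmn, List.range_succ_eq_map, List.map_cons, List.head?_cons] at hc
        simp only [Option.mem_def, Option.some.injEq] at hc
        have hcval : c = cs * (n : Int) := by rw [← hc]; simp
        subst hcval
        have hmod : w % cs < cs := Int.emod_lt_of_pos w hcs'
        have hrep : cs * (w / cs) + w % cs = w := Int.ediv_add_emod w cs
        rw [hnq]; linarith
    · intro k hk
      have h1 : (k : Int) + 1 ≤ (n : Int) := by exact_mod_cast hk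
      nlinarith
  · have hn0 : n = 0 := by
      have : PySem.Int.floordiv w cs < 1 := by
        rw [PySem.Int.floordiv_lt_iff_lt_mul hcs']; nlinarith
      omega
    refine ⟨PySem.List.pyRange 0 w cs, by simp [hn0], ?_, by simp [hn0]⟩
    intro c hc
    rw [hrange, if_neg hw] at hc
    simp at hc

def pvStepB (cs ncx ncy : Int) (s : PySem.Set (Int × Int)) (p : Int × Int) : PySem.Set (Int × Int) :=
  let i := PySem.Int.floordiv p.1 cs
  let j := PySem.Int.floordiv p.2 cs
  if 0 ≤ i ∧ i < ncx ∧ 0 ≤ j ∧ j < ncy then PySem.Set.add s (i, j) else s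

theorem pvFold_mem (cs ncx ncy : Int) (l : List (Int × Int)) (s : PySem.Set (Int × Int)) (y : Int × Int) :
    y ∈ l.foldl (pvStepB cs ncx ncy) s
      ↔ y ∈ s ∨ ∃ p ∈ l, 0 ≤ y.1 ∧ y.1 < ncx ∧ 0 ≤ y.2 ∧ y.2 < ncy
          ∧ PySem.Int.floordiv p.1 cs = y.1 ∧ PySem.Int.floordiv p.2 cs = y.2 := by
  induction l generalizing s with
  | nil => simp
  | cons p t ih =>
    simp only [List.foldl_cons, ih, List.mem_cons]
    simp only [pvStepB]
    split_ifs with hp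
    · rw [PySem.Set.mem_add]
      constructor
      · rintro (h | h)
        · rcases h with h | h
          · exact Or.inl h
          · exact Or.inr ⟨p, Or.inl rfl, by
              obtain ⟨h1, h2, h3, h4⟩ := hp
              subst h
              exact ⟨h1, h2, h3, h4, rfl, rfl⟩⟩
        · rcases h with ⟨q, hq, hrest⟩
          exact Or.inr ⟨q, Or.inr hq, hrest⟩
      · rintro (h | ⟨q, (rfl | hq), h1, h2, h3, h4, h5, h6⟩)
        · exact Or.inl (Or.inl h)
        · exact Or.inl (Or.inr (by cases y; dsimp only at h5 h6; rw [h5, h6]))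
        · exact Or.inr ⟨q, hq, h1, h2, h3, h4, h5, h6⟩
    · constructor
      · rintro (h | ⟨q, hq, hrest⟩)
        · exact Or.inl h
        · exact Or.inr ⟨q, Or.inr hq, hrest⟩
      · rintro (h | ⟨q, (rfl | hq), h1, h2, h3, h4, h5, h6⟩)
        · exact Or.inl h
        · exact absurd ⟨by omega, by omega, by omega, by omega⟩ hp
        · exact Or.inr ⟨q, hq, h1, h2, h3, h4, h5, h6⟩

theorem pvFold_nodup (cs ncx ncy : Int) (l : List (Int × Int)) (s : PySem.Set (Int × Int))
    (hs : s.Nodup) : (l.foldl (pvStepB cs ncx ncy) s).Nodup := by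
  induction l generalizing s with
  | nil => exact hs
  | cons p t ih =>
    simp only [List.foldl_cons]
    apply ih
    simp only [pvStepB]
    split_ifs
    · exact PySem.Set.nodup_add _ _ hs
    · exact hs

-- the dirty chunks of the grid, listed row by row
def pvR (blocked occ : List (Int × Int)) (cs : Int) (nx ny : Nat) : List (Int × Int) :=
  (List.range ny).flatMap (fun j : Nat =>
    ((List.range nx).map (fun i : Nat => ((i : Int), (j : Int)))).filter (fun q => pvDirty blocked occ cs q.1 q.2))

theorem pvR_nodup (blocked occ : List (Int × Int)) (cs : Int) (nx ny : Nat) :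
    (pvR blocked occ cs nx ny).Nodup := by
  rw [pvR, List.nodup_flatMap]
  constructor
  · intro j _
    apply List.Nodup.filter
    apply List.Nodup.map _ List.nodup_range
    intro a b hab
    simpa using congrArg Prod.fst hab
  · apply List.Pairwise.imp _ List.pairwise_lt_range
    intro j j' hjj
    intro q hq hq'
    simp only [List.mem_filter, List.mem_map, List.mem_range] at hq hq'
    obtain ⟨⟨i, _, rfl⟩, _⟩ := hq
    obtain ⟨⟨i', _, heq⟩, _⟩ := hq'
    have := congrArg Prod.snd heq
    simp at this
    omega

theorem pvR_mem (blocked occ : List (Int × Int)) (cs : Int) (nx ny : Nat) (y : Int × Int) :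
    y ∈ pvR blocked occ cs nx ny
      ↔ 0 ≤ y.1 ∧ y.1 < (nx : Int) ∧ 0 ≤ y.2 ∧ y.2 < (ny : Int) ∧ pvDirty blocked occ cs y.1 y.2 = true := by
  simp only [pvR, List.mem_flatMap, List.mem_filter, List.mem_map, List.mem_range]
  constructor
  · rintro ⟨j, hj, ⟨⟨i, hi, rfl⟩, hd⟩⟩
    exact ⟨by simp, by simpa using hi, by simp, by simpa using hj, hd⟩
  · rintro ⟨h1, h2, h3, h4, hd⟩
    refine ⟨y.2.toNat, by omega, ⟨⟨y.1.toNat, by omega, ?_⟩, ?_⟩⟩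
    · cases y; dsimp only at h1 h3 ⊢; congr 1 <;> omega
    · exact hd

theorem pvR_length (blocked occ : List (Int × Int)) (cs : Int) (nx ny : Nat) :
    (pvR blocked occ cs nx ny).length
      = ((List.range ny).map (fun j : Nat =>
          (List.range nx).countP (fun i : Nat => pvDirty blocked occ cs (i : Int) (j : Int)))).sum := by
  rw [pvR, List.length_flatMap]
  congr 1
  apply List.map_congr_left
  intro j _
  rw [← List.countP_eq_length_filter, List.countP_map]
  rfl

theorem pvCleanB_eq (blocked occ : List (Int × Int)) (cs i j : Int) (hcs : 1 ≤ cs) :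
    pvCleanB blocked occ cs (cs * i) (cs * j) = !pvDirty blocked occ cs i j := by
  rw [pvCleanB, ← Bool.not_or, pvA_chunk blocked occ cs i j hcs]

theorem pvA_char (map_w map_h : Int) (blocked occ : List (Int × Int)) (cs : Int) (hcs : 1 ≤ cs) :
    count_empty_clean_chunks map_w map_h blocked occ cs
      = ((List.range (max (PySem.Int.floordiv map_h cs) 0).toNat).map (fun j : Nat =>
          ((List.range (max (PySem.Int.floordiv map_w cs) 0).toNat).countP
            (fun i : Nat => !pvDirty blocked occ cs (i : Int) (j : Int)) : Int))).sum := by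
  set nx : Nat := (max (PySem.Int.floordiv map_w cs) 0).toNat with hnx
  set ny : Nat := (max (PySem.Int.floordiv map_h cs) 0).toNat with hny
  obtain ⟨lh, hH, hHbrk, hHle⟩ := pvRange_decomp map_h cs hcs
  obtain ⟨lw, hW, hWbrk, hWle⟩ := pvRange_decomp map_w cs hcs
  rw [count_empty_clean_chunks, hH,
    pvA_loopY_split map_w map_h blocked occ cs _ lh 0
      (by rintro cy hcy
          simp only [List.mem_map, List.mem_range] at hcy
          obtain ⟨k, hk, rfl⟩ := hcy
          have := hHle k hk
          omega)
      hHbrk,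
    List.foldl_map]
  rw [← hny]
  rw [PySem.List.foldl_congr_mem (List.range ny)
    (fun x y => pvA_loopX map_w blocked occ (cs * (y : Int)) cs (PySem.List.pyRange 0 map_w cs) x)
    (fun (c : Int) (k : Nat) => c + ((List.range nx).countP
            (fun i : Nat => !pvDirty blocked occ cs (i : Int) (k : Int)) : Int))
    0
    (by intro c k hk
        dsimp only
        rw [hW, pvA_loopX_split map_w blocked occ (cs * (k : Int)) cs _ lw c
          (by rintro cx hcx
              simp only [List.mem_map, List.mem_range] at hcx
              obtain ⟨k', hk', rfl⟩ := hcx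
              have := hWle k' hk'
              omega)
          hWbrk, List.countP_map, ← hnx]
        congr 2
        apply List.countP_congr
        intro i _
        simp only [Function.comp_apply]
        rw [pvCleanB_eq blocked occ cs (i : Int) (k : Int) hcs])]
  rw [PySem.List.foldl_add]
  simp

theorem pvTainted_len (map_w map_h : Int) (blocked occ : List (Int × Int)) (cs : Int) (hcs : 1 ≤ cs) :
    (occ.foldl (pvStepB cs (max (PySem.Int.floordiv map_w cs) 0) (max (PySem.Int.floordiv map_h cs) 0))
      (blocked.foldl (pvStepB cs (max (PySem.Int.floordiv map_w cs) 0) (max (PySem.Int.floordiv map_h cs) 0))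
        PySem.Set.empty)).length
      = (pvR blocked occ cs (max (PySem.Int.floordiv map_w cs) 0).toNat
          (max (PySem.Int.floordiv map_h cs) 0).toNat).length := by
  set ncx : Int := max (PySem.Int.floordiv map_w cs) 0 with hncx
  set ncy : Int := max (PySem.Int.floordiv map_h cs) 0 with hncy
  have hx : ((ncx.toNat : Int)) = ncx := Int.toNat_of_nonneg (le_max_right _ _)
  have hy : ((ncy.toNat : Int)) = ncy := Int.toNat_of_nonneg (le_max_right _ _)
  apply List.Perm.length_eq
  rw [List.perm_ext_iff_of_nodup
    (pvFold_nodup cs ncx ncy occ _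
      (pvFold_nodup cs ncx ncy blocked PySem.Set.empty
        (show (PySem.Set.empty : PySem.Set (Int × Int)).Nodup from List.nodup_nil)))
    (pvR_nodup blocked occ cs ncx.toNat ncy.toNat)]
  intro a
  rw [pvFold_mem, pvFold_mem, pvR_mem, hx, hy]
  simp only [PySem.Set.empty, List.not_mem_nil, false_or, pvDirty, List.any_eq_true,
    List.mem_append, Bool.and_eq_true, beq_iff_eq]
  constructor
  · rintro (⟨p, hp, h⟩ | ⟨p, hp, h⟩)
    · exact ⟨h.1, h.2.1, h.2.2.1, h.2.2.2.1, p, Or.inl hp, h.2.2.2.2⟩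
    · exact ⟨h.1, h.2.1, h.2.2.1, h.2.2.2.1, p, Or.inr hp, h.2.2.2.2⟩
  · rintro ⟨h1, h2, h3, h4, p, (hp | hp), h5⟩
    · exact Or.inl ⟨p, hp, h1, h2, h3, h4, h5⟩
    · exact Or.inr ⟨p, hp, h1, h2, h3, h4, h5⟩

theorem pvSum_split (f g : Nat → Nat) (nx : Nat) : ∀ n : Nat, (∀ j, j < n → f j + g j = nx) →
    ((List.range n).map (fun j : Nat => (f j : Int))).sum
      = (nx : Int) * n - ((List.range n).map (fun j : Nat => (g j : Int))).sum := by
  intro n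
  induction n with
  | zero => simp
  | succ n ih =>
    intro h
    rw [List.range_succ, List.map_append, List.map_append, List.sum_append, List.sum_append,
      ih (fun j hj => h j (by omega))]
    have hn := h n (by omega)
    simp only [List.map_cons, List.map_nil, List.sum_cons, List.sum_nil]
    push_cast
    linarith

theorem pv_main (map_w map_h : Int) (blocked occ : List (Int × Int)) (cs : Int) (hcs : 1 ≤ cs) :
    count_empty_clean_chunks map_w map_h blocked occ cs
      = count_empty_clean_chunks_alt map_w map_h blocked occ cs := by
  set ncx : Int := max (PySem.Int.floordiv map_w cs) 0 with hncx
  set ncy : Int := max (PySem.Int.floordiv map_h cs) 0 with hncy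
  have hx : ((ncx.toNat : Int)) = ncx := Int.toNat_of_nonneg (le_max_right _ _)
  have hy : ((ncy.toNat : Int)) = ncy := Int.toNat_of_nonneg (le_max_right _ _)
  have halt : count_empty_clean_chunks_alt map_w map_h blocked occ cs
      = ncx * ncy - ((occ.foldl (pvStepB cs ncx ncy)
          (blocked.foldl (pvStepB cs ncx ncy) PySem.Set.empty)).length : Int) := rfl
  rw [pvA_char map_w map_h blocked occ cs hcs, halt,
    pvTainted_len map_w map_h blocked occ cs hcs, pvR_length]
  rw [pvSum_split
    (fun j : Nat => (List.range ncx.toNat).countP (fun i : Nat => !pvDirty blocked occ cs (i : Int) (j : Int)))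
    (fun j : Nat => (List.range ncx.toNat).countP (fun i : Nat => pvDirty blocked occ cs (i : Int) (j : Int)))
    ncx.toNat ncy.toNat
    (by
      intro j hj
      dsimp only
      have hlen := List.length_eq_countP_add_countP
        (fun i : Nat => !pvDirty blocked occ cs (i : Int) (j : Int)) (l := List.range ncx.toNat)
      rw [List.length_range] at hlen
      have hpred : (fun i : Nat => decide ¬((!pvDirty blocked occ cs (i : Int) (j : Int)) = true))
          = (fun i : Nat => pvDirty blocked occ cs (i : Int) (j : Int)) := by
        funext i
        simp
      rw [hpred] at hlen
      omega)]
  rw [← hncx, ← hncy, Nat.cast_list_sum, List.map_map, hx, hy]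
  rfl

-- ===== VERDICT (by name: the statement is the Claim_ definition above) =====
theorem count_empty_clean_chunks_spec : Claim_equal_count_empty_clean_chunks := by
  intro map_w map_h blocked occ chunk_size _ hpre
  unfold Spec_count_empty_clean_chunks
  exact pv_main map_w map_h blocked occ chunk_size hpre
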